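-- pv_equiv track=rewrite | github.com/Marina-Banov/Advent-of-Code | 2021/04A.py | achieved_bingo
-- ===== SOURCE A (Python) =====
-- def achieved_bingo(array):
--     if len(array) < 5:
--         return False
--
--     for i in range(5):
--         row = [i*5, i*5+1, i*5+2, i*5+3, i*5+4]
--         if all(elem in array for elem in row):
--             return True
--
--         col = [i, i+5, i+10, i+15, i+20]
--         if all(elem in array for elem in col):
--             return True
--
--     return False
-- ===== SOURCE B (Python) =====
-- def achieved_bingo(array):
--     if len(array) < 5:
--         return False
--     rows = [set() for _ in range(5)]
--     cols = [set() for _ in range(5)]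
--     for x in array:
--         if 0 <= x < 25:
--             rows[x // 5].add(x)
--             cols[x % 5].add(x)
--     return any(len(s) == 5 for s in rows + cols)
-- ===== Notes on version B (the rewrite author's own statement) =====
-- stated objective: alternative
-- what changed: Instead of testing each of the 10 fixed lines by repeated membership scans of the list, B makes one pass over the marks, bucketing each in-range value into its row set and column set, and then checks whether any bucket reached size 5.
import Mathlib
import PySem

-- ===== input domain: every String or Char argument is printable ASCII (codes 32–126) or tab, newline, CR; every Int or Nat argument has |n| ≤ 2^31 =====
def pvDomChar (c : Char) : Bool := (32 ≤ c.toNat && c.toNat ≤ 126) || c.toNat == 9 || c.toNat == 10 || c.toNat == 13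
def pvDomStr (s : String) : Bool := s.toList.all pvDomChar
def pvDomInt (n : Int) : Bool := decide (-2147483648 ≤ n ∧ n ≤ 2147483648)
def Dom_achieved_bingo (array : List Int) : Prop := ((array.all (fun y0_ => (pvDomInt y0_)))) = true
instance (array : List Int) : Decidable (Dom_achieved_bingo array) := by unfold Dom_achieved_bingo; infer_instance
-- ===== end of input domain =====

-- B replaces A's 10 per-line membership scans by one bucketing pass into row/column sets,
-- then checks whether any bucket is complete (objective: alternative decomposition).

-- ===== PORT A =====
def achieved_bingo (array : List Int) : Bool :=
  if array.length < 5 then false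
  else
    (PySem.List.pyRange 0 5 1).any (fun i =>
      ([i*5, i*5+1, i*5+2, i*5+3, i*5+4].all (fun elem => array.contains elem))
      || ([i, i+5, i+10, i+15, i+20].all (fun elem => array.contains elem)))

-- ===== PORT B =====
-- rows[x // 5].add(x)  /  cols[x % 5].add(x)
def pvAddAt (ls : List (PySem.Set Int)) (i : Int) (x : Int) : List (PySem.Set Int) :=
  PySem.List.pySetD ls i (PySem.Set.add (PySem.List.pyGetD ls i PySem.Set.empty) x)

def pvStep (st : List (PySem.Set Int) × List (PySem.Set Int)) (x : Int) :
    List (PySem.Set Int) × List (PySem.Set Int) :=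
  if 0 ≤ x ∧ x < 25 then
    (pvAddAt st.1 (PySem.Int.floordiv x 5) x, pvAddAt st.2 (PySem.Int.mod x 5) x)
  else st

def achieved_bingo_alt (array : List Int) : Bool :=
  if array.length < 5 then false
  else
    let st := array.foldl pvStep
      ([PySem.Set.empty, PySem.Set.empty, PySem.Set.empty, PySem.Set.empty, PySem.Set.empty],
       [PySem.Set.empty, PySem.Set.empty, PySem.Set.empty, PySem.Set.empty, PySem.Set.empty])
    (st.1 ++ st.2).any (fun s => PySem.Set.len s == 5)

-- ===== PRECONDITION & SPEC =====
def Spec_achieved_bingo (array : List Int) (out : Bool) : Prop := out = achieved_bingo_alt array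
instance (array : List Int) (out : Bool) : Decidable (Spec_achieved_bingo array out) := by unfold Spec_achieved_bingo; infer_instance

-- ===== CLAIM (what is proved, stated in full; the proofs are below) =====
def Claim_equal_achieved_bingo : Prop := ∀ (array : List Int), Dom_achieved_bingo array → Spec_achieved_bingo array (achieved_bingo array)

-- ===== LEMMAS AND PROOFS =====

-- the elements B's pass sends to rows[i] / cols[j]
def pvRowP (i : Int) (x : Int) : Bool :=
  if 0 ≤ x ∧ x < 25 then PySem.Int.floordiv x 5 == i else false
def pvColP (j : Int) (x : Int) : Bool :=
  if 0 ≤ x ∧ x < 25 then PySem.Int.mod x 5 == j else false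

-- characterisation of B's single pass: each bucket collects exactly its line's marks, in order
theorem pvFold_char : ∀ (xs : List Int) (r0 r1 r2 r3 r4 c0 c1 c2 c3 c4 : PySem.Set Int),
    xs.foldl pvStep ([r0,r1,r2,r3,r4],[c0,c1,c2,c3,c4]) =
      ([(xs.filter (pvRowP 0)).foldl PySem.Set.add r0,
        (xs.filter (pvRowP 1)).foldl PySem.Set.add r1,
        (xs.filter (pvRowP 2)).foldl PySem.Set.add r2,
        (xs.filter (pvRowP 3)).foldl PySem.Set.add r3,
        (xs.filter (pvRowP 4)).foldl PySem.Set.add r4],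
       [(xs.filter (pvColP 0)).foldl PySem.Set.add c0,
        (xs.filter (pvColP 1)).foldl PySem.Set.add c1,
        (xs.filter (pvColP 2)).foldl PySem.Set.add c2,
        (xs.filter (pvColP 3)).foldl PySem.Set.add c3,
        (xs.filter (pvColP 4)).foldl PySem.Set.add c4]) := by
  intro xs
  induction xs with
  | nil => intro _ _ _ _ _ _ _ _ _ _; simp
  | cons a xs ih =>
    intro r0 r1 r2 r3 r4 c0 c1 c2 c3 c4
    by_cases h : 0 ≤ a ∧ a < 25
    · obtain ⟨h1, h2⟩ := h
      interval_cases a <;>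
        simp only [List.foldl_cons, pvStep, pvAddAt, List.filter_cons, pvRowP, pvColP] <;>
        norm_num [PySem.List.pySetD, PySem.List.pySet?, PySem.List.pyGetD, PySem.List.pyGet?,
          PySem.List.pyIdx?, PySem.Int.floordiv, PySem.Int.mod] <;>
        exact ih _ _ _ _ _ _ _ _ _ _
    · simp only [List.foldl_cons, pvStep, if_neg h, List.filter_cons, pvRowP, pvColP]
      simp only [Bool.false_eq_true, if_false]
      exact ih _ _ _ _ _ _ _ _ _ _

-- reassociating A's interleaved 10-way disjunction into B's rows-then-columns one
theorem pvOrShuffle (P0 P1 P2 P3 P4 Q0 Q1 Q2 Q3 Q4 : Prop) :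
    (P0 ∨ Q0) ∨ (P1 ∨ Q1) ∨ (P2 ∨ Q2) ∨ (P3 ∨ Q3) ∨ P4 ∨ Q4 ↔
      P0 ∨ P1 ∨ P2 ∨ P3 ∨ P4 ∨ Q0 ∨ Q1 ∨ Q2 ∨ Q3 ∨ Q4 := by
  constructor
  · rintro ((h | h) | (h | h) | (h | h) | (h | h) | h | h) <;> simp [h]
  · rintro (h | h | h | h | h | h | h | h | h | h) <;> simp [h]

-- a Nodup list inside a 5-element value set has length 5 iff it contains all five values
theorem pvLen5_iff (l : List Int) (a b c d e : Int) (hnd : l.Nodup)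
    (hab : a ≠ b) (hac : a ≠ c) (had : a ≠ d) (hae : a ≠ e) (hbc : b ≠ c) (hbd : b ≠ d)
    (hbe : b ≠ e) (hcd : c ≠ d) (hce : c ≠ e) (hde : d ≠ e)
    (hsub : ∀ x ∈ l, x = a ∨ x = b ∨ x = c ∨ x = d ∨ x = e) :
    l.length = 5 ↔ (a ∈ l ∧ b ∈ l ∧ c ∈ l ∧ d ∈ l ∧ e ∈ l) := by
  have hmnd : ([a,b,c,d,e] : List Int).Nodup := by
    simp [List.nodup_cons, hab, hac, had, hae, hbc, hbd, hbe, hcd, hce, hde]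
  have hsp : l.Subperm [a,b,c,d,e] := hnd.subperm (by
    intro x hx
    rcases hsub x hx with h | h | h | h | h <;> simp [h])
  constructor
  · intro hlen
    have hperm : l.Perm [a,b,c,d,e] := hsp.perm_of_length_le (by simp [hlen])
    have hm := fun y => (hperm.mem_iff (a := y)).symm
    exact ⟨(hm a).mp (by simp), (hm b).mp (by simp), (hm c).mp (by simp),
      (hm d).mp (by simp), (hm e).mp (by simp)⟩
  · rintro ⟨ha, hb, hc, hd, he⟩
    have hsp2 : ([a,b,c,d,e] : List Int).Subperm l := hmnd.subperm (by
      intro x hx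
      simp only [List.mem_cons, List.not_mem_nil, or_false] at hx
      rcases hx with h | h | h | h | h <;> simp [h, ha, hb, hc, hd, he])
    have h1 := hsp.length_le
    have h2 := hsp2.length_le
    simp at h1 h2
    omega

-- one bucket is complete iff all five of its line's values were marked
theorem pvLine_iff (array : List Int) (p : Int → Bool) (a b c d e : Int)
    (hab : a ≠ b) (hac : a ≠ c) (had : a ≠ d) (hae : a ≠ e) (hbc : b ≠ c) (hbd : b ≠ d)
    (hbe : b ≠ e) (hcd : c ≠ d) (hce : c ≠ e) (hde : d ≠ e)
    (hp : ∀ x, p x = true → x = a ∨ x = b ∨ x = c ∨ x = d ∨ x = e)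
    (hpa : p a = true) (hpb : p b = true) (hpc : p c = true) (hpd : p d = true)
    (hpe : p e = true) :
    PySem.Set.len (PySem.Set.ofList (array.filter p)) = 5 ↔
      (a ∈ array ∧ b ∈ array ∧ c ∈ array ∧ d ∈ array ∧ e ∈ array) := by
  have hmem : ∀ y, y ∈ PySem.Set.ofList (array.filter p) ↔ y ∈ array.filter p :=
    fun y => PySem.Set.mem_ofList _ y
  have hkey := pvLen5_iff (PySem.Set.ofList (array.filter p)) a b c d e
    (PySem.Set.nodup_ofList _) hab hac had hae hbc hbd hbe hcd hce hde (by
      intro x hx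
      have := (hmem x).mp hx
      exact hp x (List.of_mem_filter this))
  have hlen : PySem.Set.len (PySem.Set.ofList (array.filter p)) = 5 ↔
      (PySem.Set.ofList (array.filter p)).length = 5 := by
    simp [PySem.Set.len]; omega
  rw [hlen, hkey, hmem, hmem, hmem, hmem, hmem]
  simp [List.mem_filter, hpa, hpb, hpc, hpd, hpe]

-- ===== VERDICT (by name: the statement is the Claim_ definition above) =====
theorem achieved_bingo_spec : Claim_equal_achieved_bingo := by
  intro array _
  unfold Spec_achieved_bingo achieved_bingo achieved_bingo_alt
  by_cases hlen : array.length < 5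
  · simp [hlen]
  · simp only [hlen, if_false]
    rw [show PySem.List.pyRange 0 5 1 = [0,1,2,3,4] from rfl]
    rw [pvFold_char]
    rw [Bool.eq_iff_iff]
    have row : ∀ i : Int, 0 ≤ i → i < 5 → ∀ x, pvRowP i x = true →
        x = i*5 ∨ x = i*5+1 ∨ x = i*5+2 ∨ x = i*5+3 ∨ x = i*5+4 := by
      intro i hi0 hi5 x hx
      simp only [pvRowP] at hx
      split at hx
      · rename_i hr
        rw [PySem.Int.floordiv_eq_ediv_of_pos (by omega)] at hx
        have := beq_iff_eq.mp hx
        omega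
      · exact absurd hx (by simp)
    have col : ∀ j : Int, 0 ≤ j → j < 5 → ∀ x, pvColP j x = true →
        x = j ∨ x = j+5 ∨ x = j+10 ∨ x = j+15 ∨ x = j+20 := by
      intro j hj0 hj5 x hx
      simp only [pvColP] at hx
      split at hx
      · rename_i hr
        rw [PySem.Int.mod_eq_emod_of_pos (by omega)] at hx
        have := beq_iff_eq.mp hx
        omega
      · exact absurd hx (by simp)
    have R0 := pvLine_iff array (pvRowP 0) 0 1 2 3 4 (by decide) (by decide) (by decide)
      (by decide) (by decide) (by decide) (by decide) (by decide) (by decide) (by decide)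
      (row 0 (by decide) (by decide)) (by decide) (by decide) (by decide) (by decide) (by decide)
    have R1 := pvLine_iff array (pvRowP 1) 5 6 7 8 9 (by decide) (by decide) (by decide)
      (by decide) (by decide) (by decide) (by decide) (by decide) (by decide) (by decide)
      (row 1 (by decide) (by decide)) (by decide) (by decide) (by decide) (by decide) (by decide)
    have R2 := pvLine_iff array (pvRowP 2) 10 11 12 13 14 (by decide) (by decide) (by decide)
      (by decide) (by decide) (by decide) (by decide) (by decide) (by decide) (by decide)
      (row 2 (by decide) (by decide)) (by decide) (by decide) (by decide) (by decide) (by decide)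
    have R3 := pvLine_iff array (pvRowP 3) 15 16 17 18 19 (by decide) (by decide) (by decide)
      (by decide) (by decide) (by decide) (by decide) (by decide) (by decide) (by decide)
      (row 3 (by decide) (by decide)) (by decide) (by decide) (by decide) (by decide) (by decide)
    have R4 := pvLine_iff array (pvRowP 4) 20 21 22 23 24 (by decide) (by decide) (by decide)
      (by decide) (by decide) (by decide) (by decide) (by decide) (by decide) (by decide)
      (row 4 (by decide) (by decide)) (by decide) (by decide) (by decide) (by decide) (by decide)
    have C0 := pvLine_iff array (pvColP 0) 0 5 10 15 20 (by decide) (by decide) (by decide)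
      (by decide) (by decide) (by decide) (by decide) (by decide) (by decide) (by decide)
      (col 0 (by decide) (by decide)) (by decide) (by decide) (by decide) (by decide) (by decide)
    have C1 := pvLine_iff array (pvColP 1) 1 6 11 16 21 (by decide) (by decide) (by decide)
      (by decide) (by decide) (by decide) (by decide) (by decide) (by decide) (by decide)
      (col 1 (by decide) (by decide)) (by decide) (by decide) (by decide) (by decide) (by decide)
    have C2 := pvLine_iff array (pvColP 2) 2 7 12 17 22 (by decide) (by decide) (by decide)
      (by decide) (by decide) (by decide) (by decide) (by decide) (by decide) (by decide)
      (col 2 (by decide) (by decide)) (by decide) (by decide) (by decide) (by decide) (by decide)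
    have C3 := pvLine_iff array (pvColP 3) 3 8 13 18 23 (by decide) (by decide) (by decide)
      (by decide) (by decide) (by decide) (by decide) (by decide) (by decide) (by decide)
      (col 3 (by decide) (by decide)) (by decide) (by decide) (by decide) (by decide) (by decide)
    have C4 := pvLine_iff array (pvColP 4) 4 9 14 19 24 (by decide) (by decide) (by decide)
      (by decide) (by decide) (by decide) (by decide) (by decide) (by decide) (by decide)
      (col 4 (by decide) (by decide)) (by decide) (by decide) (by decide) (by decide) (by decide)
    simp only [List.any_cons, List.any_nil, List.all_cons, List.all_nil, List.cons_append,
      List.nil_append, Bool.or_eq_true, Bool.and_eq_true, List.contains_iff_mem,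
      beq_iff_eq, Bool.or_false, Bool.and_true]
    norm_num
    simp only [PySem.Set.len, PySem.Set.ofList_eq_foldl] at R0 R1 R2 R3 R4 C0 C1 C2 C3 C4
    rw [R0, R1, R2, R3, R4, C0, C1, C2, C3, C4]
    exact pvOrShuffle _ _ _ _ _ _ _ _ _ _
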